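-- pv_equiv track=rewrite | github.com/BenMagowan/Puzzle_Solvers | test/zip.py | solve
-- ===== SOURCE A (Python) =====
-- walls = [
--     [6, 7],
--     [12, 13],
--     [18, 19],
--     [24, 25],
--     [10, 11],
--     [16, 17],
--     [22, 23],
--     [28, 29]
-- ]
--
-- def find_empty_cells(path):
--     N = 6
--
--     # Find location of end of path
--     end = path.index(max(path))
--
--     empty_cells = []
--     # Up
--     if end - N >= 0 and path[end - N] == 0 and [end, end-N] not in walls:
--         empty_cells.append(end - N)
--     # Down
--     if end + N <= N*N-1 and path[end + N] == 0 and [end, end+N] not in walls: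
--         empty_cells.append(end + N)
--     # Left
--     if end % N > 0 and path[end - 1] == 0 and [end, end-1] not in walls:
--         empty_cells.append(end - 1)
--     # Right
--     if end % N < N - 1 and path[end + 1] == 0 and [end, end+1] not in walls:
--         empty_cells.append(end + 1)
--
--     return empty_cells
--
-- def is_valid(grid, path):
--     N = 6
--
--     # check to dots are connected in order
--     # First get the location of the dots in order
--     locations = [grid.index(dot) for dot in grid if dot != 0]
--
--     # Order locations based on grid value
--     locations.sort(key=lambda x: grid[x])
--
--     # Check if the path is in order
--     for i in range(len(locations)-1):
--         if path[locations[i+1]] != 0: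
--             if path[locations[i]] > path[locations[i+1]]:
--                 return False
--             if path[locations[i]] == 0 and path[locations[i+1]] != 0:
--                 return False
--
--     return True
--
-- def solve(grid, path):
--     N = 6
--
--     next_num = max(path) + 1
--
--     if next_num > N*N:
--         return True
--
--     empty_cells = find_empty_cells(path)
--
--     if not empty_cells:
--         return False
--
--     for empty_cell in empty_cells:
--         if is_valid(grid, path):
--             path[empty_cell] = next_num
--
--             if solve(grid, path):
--                 return True
--
--             path[empty_cell] = 0  # backtrack
--
--     return False
-- ===== SOURCE B (Python) =====
-- # B: explicit-stack DFS over immutable snapshots; frames carry the next number to place,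
-- # a first-occurrence dict replaces repeated grid.index scans, and the per-node validity
-- # check replaces A's per-candidate one.  Return-value equivalent to A; on success the
-- # solved state is written back into `path` (matching A's final mutation; transient
-- # in-place states during the search differ, A mutates step by step).
-- WALL = {(6, 7), (12, 13), (18, 19), (24, 25), (10, 11), (16, 17), (22, 23), (28, 29)}
--
-- def _ordered(grid, path):
--     first = {}
--     for i, v in enumerate(grid):
--         if v != 0 and v not in first:
--             first[v] = i
--     locs = sorted((first[v] for v in grid if v != 0), key=lambda x: grid[x])
--     return all(path[b] == 0 or (path[a] != 0 and path[a] <= path[b])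
--                for a, b in zip(locs, locs[1:]))
--
-- def _moves(grid, path, nxt):
--     if not _ordered(grid, path):
--         return []
--     end = path.index(nxt - 1)
--     out = []
--     for d in (-6, 6, -1, 1):
--         n = end + d
--         if 0 <= n < 36 and (d * d == 36 or n // 6 == end // 6) \
--                 and (end, n) not in WALL and path[n] == 0:
--             out.append(n)
--     return out
--
-- def solve(grid, path):
--     nxt = max(path) + 1
--     if nxt > 36:
--         return True
--     stack = [(list(path), nxt, _moves(grid, path, nxt))]
--     while stack:
--         cur, nxt, rem = stack.pop()
--         if not rem:
--             continue
--         cell = rem[0]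
--         stack.append((cur, nxt, rem[1:]))
--         child = list(cur)
--         child[cell] = nxt
--         if nxt == 36:
--             path[:] = child
--             return True
--         stack.append((child, nxt + 1, _moves(grid, child, nxt + 1)))
--     return False
-- ===== Notes on version B (the rewrite author's own statement) =====
-- stated objective: alternative
-- what changed: Replaces A's recursive mutate-and-restore backtracking with an iterative DFS over an explicit stack of immutable (state, next-number, remaining-candidates) frames: the next number to place is carried instead of recomputed with max() per node, the path head is found as index(next-1) instead of index(max(path)), the candidate neighbours come from one delta loop instead of four if-blocks, is_valid's repeated grid.index scans are replaced by a first-occurrence dict and a zip/all pair check, and validity is checked once per node instead of once per sibling candidate.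
-- outside the precondition, e.g. on solve([], [7, 1, 2, 3, 4, 5, 6]): A returns False, B returns False
import Mathlib
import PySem

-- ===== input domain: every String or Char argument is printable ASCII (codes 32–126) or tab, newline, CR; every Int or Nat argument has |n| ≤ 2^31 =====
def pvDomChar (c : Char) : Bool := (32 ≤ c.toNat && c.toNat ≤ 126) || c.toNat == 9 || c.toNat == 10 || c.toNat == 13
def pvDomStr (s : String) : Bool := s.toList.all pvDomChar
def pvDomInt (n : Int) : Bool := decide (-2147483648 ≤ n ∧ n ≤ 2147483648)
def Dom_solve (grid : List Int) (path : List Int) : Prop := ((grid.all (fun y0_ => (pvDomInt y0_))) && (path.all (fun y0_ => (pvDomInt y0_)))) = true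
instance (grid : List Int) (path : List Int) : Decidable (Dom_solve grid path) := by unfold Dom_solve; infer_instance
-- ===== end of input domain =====

-- B replaces A's recursive mutate-and-restore backtracking by an iterative DFS over an
-- explicit stack of immutable (state, next number, remaining candidates) frames, with a
-- first-occurrence dict in the validity check and one validity check per node.
-- Equivalence is about the return value (Source B writes the solved state back on success,
-- matching A's final mutation; transient in-place states during the search differ).

-- ===== PORT A =====
-- module-level constant `walls` (2-element lists ported as pairs; exact)
def walls : List (Int × Int) :=
  [(6, 7), (12, 13), (18, 19), (24, 25), (10, 11), (16, 17), (22, 23), (28, 29)]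

-- max(path): Python max of a nonempty list; Pre_ excludes path = [] (ValueError)
def pymax (path : List Int) : Int := (PySem.List.max? path (fun x => x)).getD 0

-- end = path.index(max(path)); under Pre_ the max is present, so index? is `some`
def endIdx (path : List Int) : Int := ((PySem.List.index? path (pymax path)).getD 0 : Nat)

-- helper find_empty_cells: path[i] reads are `pyGet? = some 0` tests; under Pre_
-- (length 36) every probed index is in range, so this is exact.
def findEmptyCells (path : List Int) : List Int :=
  let e : Int := endIdx path
  (if 0 ≤ e - 6 ∧ PySem.List.pyGet? path (e - 6) = some 0 ∧ (e, e - 6) ∉ walls then [e - 6] else []) ++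
  (if e + 6 ≤ 35 ∧ PySem.List.pyGet? path (e + 6) = some 0 ∧ (e, e + 6) ∉ walls then [e + 6] else []) ++
  (if 0 < PySem.Int.mod e 6 ∧ PySem.List.pyGet? path (e - 1) = some 0 ∧ (e, e - 1) ∉ walls then [e - 1] else []) ++
  (if PySem.Int.mod e 6 < 5 ∧ PySem.List.pyGet? path (e + 1) = some 0 ∧ (e, e + 1) ∉ walls then [e + 1] else [])

-- the `for i in range(len(locations)-1)` check over consecutive location pairs
def chkPairs (path : List Int) : List Int → Bool
  | a :: b :: rest =>
      if PySem.List.pyGetD path b 0 ≠ 0 then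
        if PySem.List.pyGetD path a 0 > PySem.List.pyGetD path b 0 then false
        else if PySem.List.pyGetD path a 0 = 0 ∧ PySem.List.pyGetD path b 0 ≠ 0 then false
        else chkPairs path (b :: rest)
      else chkPairs path (b :: rest)
  | _ => true

-- helper is_valid: locations via repeated grid.index, sorted with key grid[x]
def isValid (grid : List Int) (path : List Int) : Bool :=
  chkPairs path
    (PySem.List.sorted
      ((grid.filter (fun dot => !(dot == 0))).map
        (fun dot => (((PySem.List.index? grid dot).getD 0 : Nat) : Int)))
      (fun x => PySem.List.pyGetD grid x 0) false)

-- A's `for empty_cell in empty_cells:` loop; `child` is the recursive call at one less fuel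
def tryCells (child : List Int → Bool) (grid : List Int) (path : List Int) (nn : Int) :
    List Int → Bool
  | [] => false
  | c :: cs =>
      if isValid grid path then
        if child (PySem.List.pySetD path c nn) then true
        else tryCells child grid path nn cs
      else tryCells child grid path nn cs

-- A's recursion with a fuel bound: each level fills one zero cell of the 36-cell path, so
-- depth ≤ 37 and fuel 37 is never exhausted under Pre_ (proved below via the zero count).
def solveFuel (grid : List Int) : Nat → List Int → Bool
  | 0, _ => false
  | (f + 1), path =>
      let nn := pymax path + 1
      if nn > 36 then true
      else
        let empt := findEmptyCells path
        if empt = [] then false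
        else tryCells (solveFuel grid f) grid path nn empt

def solve (grid : List Int) (path : List Int) : Bool := solveFuel grid 37 path

-- ===== PORT B =====
-- WALL: a python set of pairs
def wallSet : PySem.Set (Int × Int) :=
  PySem.Set.ofList [(6, 7), (12, 13), (18, 19), (24, 25), (10, 11), (16, 17), (22, 23), (28, 29)]

-- `for i, v in enumerate(grid): if v != 0 and v not in first: first[v] = i`
def firstLoop (d : PySem.Dict Int Int) (i : Int) : List Int → PySem.Dict Int Int
  | [] => d
  | v :: rest =>
      if ¬ v = 0 ∧ PySem.Dict.contains d v = false then
        firstLoop (PySem.Dict.insert d v i) (i + 1) rest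
      else firstLoop d (i + 1) rest

-- _ordered's sorted location list: first-occurrence dict instead of repeated grid.index
def locsB (grid : List Int) : List Int :=
  PySem.List.sorted
    ((grid.filter (fun v => !(v == 0))).map
      (fun v => (PySem.Dict.get? (firstLoop PySem.Dict.empty 0 grid) v).getD 0))
    (fun x => PySem.List.pyGetD grid x 0) false

-- _ordered: an all() over consecutive sorted locations
def orderedB (grid : List Int) (path : List Int) : Bool :=
  ((locsB grid).zip (locsB grid).tail).all (fun p =>
    (PySem.List.pyGetD path p.2 0 == 0) ||
    ((PySem.List.pyGetD path p.1 0 != 0) &&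
      decide (PySem.List.pyGetD path p.1 0 ≤ PySem.List.pyGetD path p.2 0)))

-- _moves: nothing if the state is not ordered; else the empty neighbours of the head
-- cell (= path.index(nxt - 1)), vertical then horizontal candidates
-- the head cell: the last placed number nxt-1 sits at path.index(nxt - 1)
def headB (path : List Int) (nxt : Int) : Int :=
  ((PySem.List.index? path (nxt - 1)).getD 0 : Nat)

def movesB (grid : List Int) (path : List Int) (nxt : Int) : List Int :=
  if !orderedB grid path then []
  else
    ([headB path nxt - 1, headB path nxt + 1]).foldl (fun out n =>
      if 0 ≤ n ∧ n < 36 ∧ PySem.Int.floordiv n 6 = PySem.Int.floordiv (headB path nxt) 6 ∧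
          (headB path nxt, n) ∉ wallSet ∧ PySem.List.pyGet? path n = some 0
      then out ++ [n] else out)
      (([headB path nxt - 6, headB path nxt + 6]).foldl (fun out n =>
        if 0 ≤ n ∧ n < 36 ∧ (headB path nxt, n) ∉ wallSet ∧ PySem.List.pyGet? path n = some 0
        then out ++ [n] else out) [])

-- the while loop over the explicit stack of frames (fuel bounds the iteration count;
-- 5^39 is proved sufficient below)
def loopB (grid : List Int) : Nat → List (List Int × Int × List Int) → Bool
  | 0, _ => false
  | (_ + 1), [] => false
  | (f + 1), (_, _, []) :: stack => loopB grid f stack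
  | (f + 1), (cur, nxt, c :: rem) :: stack =>
      let child := PySem.List.pySetD cur c nxt
      if nxt = 36 then true
      else loopB grid f ((child, nxt + 1, movesB grid child (nxt + 1)) :: (cur, nxt, rem) :: stack)

def solve_alt (grid : List Int) (path : List Int) : Bool :=
  let nxt := (PySem.List.max? path (fun x => x)).getD 0 + 1
  if nxt > 36 then true
  else loopB grid (5 ^ 39) [(path, nxt, movesB grid path nxt)]

-- ===== PRECONDITION & SPEC =====
-- Inputs on which A returns: either some cell already exceeds 35 (then max(path)+1 > 36 and A
-- returns True at once, touching no index), or the natural domain of the fixed 6x6 puzzle — a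
-- 36-cell path and a 36-cell grid.  On other shapes A raises IndexError/ValueError on most
-- inputs; it does happen to return on some irregular shapes outside the puzzle's domain
-- (e.g. grid = [], path = [7,1,2,3,4,5,6], where both A and B return False) — those are excluded.
def Pre_solve (grid : List Int) (path : List Int) : Prop :=
  (∃ x ∈ path, 35 < x) ∨ (path.length = 36 ∧ grid.length = 36)

instance (grid : List Int) (path : List Int) : Decidable (Pre_solve grid path) := by
  unfold Pre_solve; infer_instance

def pvWitness_solve : List Int × List Int :=
  ([0, 0, 0, 0, 0, 0, 0, 0, 0, 0, 0, 0, 0, 0, 0, 0, 0, 0,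
    0, 0, 0, 0, 0, 0, 0, 0, 0, 0, 0, 0, 0, 0, 0, 0, 0, 1],
   [1, 0, 0, 0, 0, 0, 0, 0, 0, 0, 0, 0, 0, 0, 0, 0, 0, 0,
    0, 0, 0, 0, 0, 0, 0, 0, 0, 0, 0, 0, 0, 0, 0, 0, 0, 0])

def Spec_solve (grid : List Int) (path : List Int) (out : Bool) : Prop := out = solve_alt grid path
instance (grid : List Int) (path : List Int) (out : Bool) : Decidable (Spec_solve grid path out) := by
  unfold Spec_solve; infer_instance

-- ===== CLAIM (what is proved, stated in full; the proofs are below) =====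
def Claim_equal_solve : Prop := ∀ (grid : List Int) (path : List Int), Dom_solve grid path → Pre_solve grid path → Spec_solve grid path (solve grid path)

-- ===== LEMMAS AND PROOFS =====

-- the semantics of one node: its candidate cells (empty, and only if the state is valid)
def cands (grid : List Int) (path : List Int) : List Int :=
  if isValid grid path then findEmptyCells path else []

-- a candidate cell: a valid nonnegative index holding 0
def cellOK (path : List Int) (c : Int) : Prop :=
  0 ≤ c ∧ PySem.List.pyGet? path c = some 0

-- number of still-empty cells
def zeros (path : List Int) : Nat := path.count 0

lemma cellOK_set (path : List Int) (c : Int) (h : cellOK path c) (v : Int) :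
    PySem.List.pySetD path c v = path.set c.toNat v := by
  exact PySem.List.pySetD_of_nonneg path v h.1

lemma cellOK_get (path : List Int) (c : Int) (h : cellOK path c) :
    path[c.toNat]? = some 0 := by
  have := h.2
  rwa [PySem.List.pyGet?_of_nonneg path h.1] at this

lemma cellOK_lt (path : List Int) (c : Int) (h : cellOK path c) :
    c.toNat < path.length := by
  have := cellOK_get path c h
  exact (List.getElem?_eq_some_iff.mp this).1

lemma cellOK_zero_mem (path : List Int) (c : Int) (h : cellOK path c) : (0 : Int) ∈ path := by
  exact List.mem_of_getElem? (cellOK_get path c h)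

lemma pymax_le (path : List Int) (y : Int) (hy : y ∈ path) : y ≤ pymax path := by
  cases hmx : PySem.List.max? path (fun x => x) with
  | none => exact absurd ((PySem.List.max?_eq_none_iff path _).mp hmx ▸ hy) (by simp)
  | some m0 =>
      have h1 := PySem.List.max?_isMax hmx y hy
      simpa [pymax, hmx] using h1

lemma pymax_eq (path : List Int) (m : Int) (hne : path ≠ [])
    (hm : m ∈ path) (hmax : ∀ y ∈ path, y ≤ m) : pymax path = m := by
  cases hmx : PySem.List.max? path (fun x => x) with
  | none => exact absurd ((PySem.List.max?_eq_none_iff path _).mp hmx) hne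
  | some m0 =>
      have h1 : m ≤ m0 := PySem.List.max?_isMax hmx m hm
      have h2 : m0 ≤ m := hmax m0 (PySem.List.max?_mem hmx)
      simp [pymax, hmx]
      omega

lemma pymax_nonneg (path : List Int) (c : Int) (h : cellOK path c) : 0 ≤ pymax path := by
  exact pymax_le path 0 (cellOK_zero_mem path c h)

lemma pymax_set (path : List Int) (c : Int) (h : cellOK path c) :
    pymax (PySem.List.pySetD path c (pymax path + 1)) = pymax path + 1 := by
  have hlt := cellOK_lt path c h
  rw [cellOK_set path c h]
  apply pymax_eq
  · exact List.ne_nil_of_length_pos (by simp; omega)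
  · have hlt' : c.toNat < (path.set c.toNat (pymax path + 1)).length := by simpa using hlt
    have hmem := List.getElem_mem hlt'
    rwa [List.getElem_set_self hlt'] at hmem
  · intro y hy
    rcases List.mem_or_eq_of_mem_set hy with hy' | rfl
    · have := pymax_le path y hy'; omega
    · exact le_refl _

lemma zeros_set (path : List Int) (c : Int) (h : cellOK path c) (v : Int) (hv : v ≠ 0) :
    zeros (PySem.List.pySetD path c v) + 1 = zeros path := by
  have hlt := cellOK_lt path c h
  have hget := cellOK_get path c h
  have hgetE : path[c.toNat] = 0 := by
    have := List.getElem?_eq_getElem hlt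
    rw [hget] at this
    exact (Option.some.inj this).symm
  rw [cellOK_set path c h]
  unfold zeros
  rw [List.count_set hlt]
  have hpos : 0 < path.count 0 := List.count_pos_iff.mpr (cellOK_zero_mem path c h)
  simp [hgetE, hv]
  omega

lemma zeros_le_len (path : List Int) : zeros path ≤ path.length := by
  unfold zeros; exact List.count_le_length

lemma length_set' (path : List Int) (c : Int) (v : Int) :
    (PySem.List.pySetD path c v).length = path.length := by
  exact PySem.List.length_pySetD path c v

lemma mem_ite_singleton (P : Prop) [Decidable P] (x c : Int)
    (h : c ∈ (if P then [x] else ([] : List Int))) : P ∧ c = x := by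
  split at h
  · next hp => simp at h; exact ⟨hp, h⟩
  · simp at h

lemma mem_findEmpty (path : List Int) (c : Int) (h : c ∈ findEmptyCells path) : cellOK path c := by
  unfold findEmptyCells at h
  set e : Int := endIdx path with he
  have he0 : 0 ≤ e := Int.natCast_nonneg _
  simp only [List.mem_append] at h
  rcases h with ((h | h) | h) | h
  · obtain ⟨⟨h1, h2, _⟩, rfl⟩ := mem_ite_singleton _ _ _ h
    exact ⟨h1, h2⟩
  · obtain ⟨⟨h1, h2, _⟩, rfl⟩ := mem_ite_singleton _ _ _ h
    exact ⟨by omega, h2⟩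
  · obtain ⟨⟨h1, h2, _⟩, rfl⟩ := mem_ite_singleton _ _ _ h
    rw [PySem.Int.mod_eq_emod_of_pos (by norm_num)] at h1
    refine ⟨?_, h2⟩
    omega
  · obtain ⟨⟨h1, h2, _⟩, rfl⟩ := mem_ite_singleton _ _ _ h
    exact ⟨by omega, h2⟩

lemma length_findEmpty (path : List Int) : (findEmptyCells path).length ≤ 4 := by
  unfold findEmptyCells
  dsimp only
  split_ifs <;> simp

lemma mem_cands (grid path : List Int) (c : Int) (h : c ∈ cands grid path) : cellOK path c := by
  unfold cands at h
  split at h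
  · exact mem_findEmpty path c h
  · simp at h

lemma length_cands (grid path : List Int) : (cands grid path).length ≤ 4 := by
  unfold cands
  split
  · exact length_findEmpty path
  · simp

lemma tryCells_invalid (ch : List Int → Bool) (grid path : List Int) (nn : Int)
    (cells : List Int) (h : isValid grid path = false) :
    tryCells ch grid path nn cells = false := by
  induction cells with
  | nil => rfl
  | cons c cs ih => simp [tryCells, h, ih]

lemma tryCells_valid (ch : List Int → Bool) (grid path : List Int) (nn : Int)
    (cells : List Int) (h : isValid grid path = true) :
    tryCells ch grid path nn cells =
      cells.foldr (fun c acc => ch (PySem.List.pySetD path c nn) || acc) false := by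
  induction cells with
  | nil => rfl
  | cons c cs ih =>
      simp only [tryCells, h, if_true, List.foldr_cons, ← ih]
      cases ch (PySem.List.pySetD path c nn) <;> simp

lemma foldr_or_congr (l : List Int) (f g : Int → Bool)
    (h : ∀ c ∈ l, f c = g c) :
    l.foldr (fun c acc => f c || acc) false = l.foldr (fun c acc => g c || acc) false := by
  induction l with
  | nil => rfl
  | cons c cs ih =>
      simp only [List.foldr_cons, h c (by simp), ih (fun x hx => h x (by simp [hx]))]

-- fuel irrelevance for A's recursion: any fuel above the zero count gives the same value
lemma solveFuel_fi (grid : List Int) : ∀ n f f' path, f + f' ≤ n →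
    zeros path < f → zeros path < f' → solveFuel grid f path = solveFuel grid f' path := by
  intro n
  induction n with
  | zero => intro f f' path hle hf hf'; omega
  | succ n ih =>
      intro f f' path hle hf hf'
      obtain ⟨fa, rfl⟩ : ∃ fa, f = fa + 1 := ⟨f - 1, by omega⟩
      obtain ⟨fb, rfl⟩ : ∃ fb, f' = fb + 1 := ⟨f' - 1, by omega⟩
      simp only [solveFuel]
      by_cases hgt : pymax path + 1 > 36
      · simp [hgt]
      · simp only [if_neg hgt]
        by_cases hemp : findEmptyCells path = []
        · simp [hemp]
        · simp only [if_neg hemp]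
          by_cases hv : isValid grid path
          · rw [tryCells_valid _ _ _ _ _ hv, tryCells_valid _ _ _ _ _ hv]
            apply foldr_or_congr
            intro c hc
            have hcell := mem_findEmpty path c hc
            have hnn : pymax path + 1 ≠ 0 := by
              have := pymax_nonneg path c hcell; omega
            have hz := zeros_set path c hcell (pymax path + 1) hnn
            exact ih fa fb _ (by omega) (by omega) (by omega)
          · rw [tryCells_invalid _ _ _ _ _ (by simpa using hv),
                tryCells_invalid _ _ _ _ _ (by simpa using hv)]

-- A's result, one node at a time (all children at fuel 37)
def anyA (grid path : List Int) (cells : List Int) : Bool :=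
  cells.foldr (fun c acc => solveFuel grid 37 (PySem.List.pySetD path c (pymax path + 1)) || acc) false

-- unfolding A at a node of the 36-cell board
lemma solveFuel_node (grid path : List Int) (f : Nat) (hlen : path.length = 36)
    (hz : zeros path < f + 1) :
    solveFuel grid (f + 1) path =
      if pymax path + 1 > 36 then true else anyA grid path (cands grid path) := by
  have hz36 : zeros path ≤ 36 := by have := zeros_le_len path; omega
  simp only [solveFuel]
  by_cases hgt : pymax path + 1 > 36
  · simp [hgt]
  · simp only [if_neg hgt]
    unfold cands
    by_cases hv : isValid grid path
    · simp only [hv, if_true]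
      by_cases hemp : findEmptyCells path = []
      · simp [hemp, anyA]
      · simp only [if_neg hemp]
        rw [tryCells_valid _ _ _ _ _ hv]
        unfold anyA
        apply foldr_or_congr
        intro c hc
        have hcell := mem_findEmpty path c hc
        have hnn : pymax path + 1 ≠ 0 := by
          have := pymax_nonneg path c hcell; omega
        have hzc := zeros_set path c hcell (pymax path + 1) hnn
        exact solveFuel_fi grid (f + 37) f 37 _ (by omega) (by omega) (by omega)
    · simp only [hv]
      by_cases hemp : findEmptyCells path = []
      · simp [hemp, anyA]
      · simp only [if_neg hemp]
        rw [tryCells_invalid _ _ _ _ _ (by simpa using hv)]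
        simp [anyA]

-- ============ bridging B's helpers to A's ============

lemma wall_mem_iff (p : Int × Int) : p ∈ wallSet ↔ p ∈ walls := by
  unfold wallSet walls
  rw [PySem.Set.mem_ofList]

lemma endIdx_lt (path : List Int) (hne : path ≠ []) : endIdx path < (path.length : Int) := by
  unfold endIdx
  have hm : pymax path ∈ path := by
    unfold pymax
    cases hmx : PySem.List.max? path (fun x => x) with
    | none => exact absurd ((PySem.List.max?_eq_none_iff path _).mp hmx) hne
    | some m0 => simpa using PySem.List.max?_mem hmx
  have : (PySem.List.index? path (pymax path)).isSome := by
    rw [PySem.List.index?_isSome_iff]; exact hm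
  obtain ⟨i, hi⟩ := Option.isSome_iff_exists.mp this
  obtain ⟨hk, -, -⟩ := PySem.List.getElem_of_index?_eq_some hi
  rw [hi]
  exact_mod_cast hk

-- the first-occurrence dict agrees with repeated list.index
lemma firstLoop_get : ∀ (l : List Int) (d : PySem.Dict Int Int) (i : Int) (v : Int), v ≠ 0 →
    PySem.Dict.get? (firstLoop d i l) v =
      (PySem.Dict.get? d v).or ((PySem.List.index? l v).map (fun j => i + (j : Int))) := by
  intro l
  induction l with
  | nil =>
      intro d i v hv
      simp [firstLoop]
  | cons w rest ih =>
      intro d i v hv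
      by_cases hw : v = w
      · subst hw
        by_cases hc : PySem.Dict.contains d v
        · have hcond : ¬ (¬ v = 0 ∧ PySem.Dict.contains d v = false) := by simp [hc]
          simp only [firstLoop, if_neg hcond]
          rw [ih _ _ _ hv]
          have hsome : (PySem.Dict.get? d v).isSome := by
            rw [← PySem.Dict.contains_eq_isSome_get?]; exact hc
          obtain ⟨u, hu⟩ := Option.isSome_iff_exists.mp hsome
          simp [hu]
        · have hcond : (¬ v = 0 ∧ PySem.Dict.contains d v = false) := by
            exact ⟨hv, by simpa using hc⟩
          simp only [firstLoop, if_pos hcond]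
          rw [ih _ _ _ hv]
          have hnone : PySem.Dict.get? d v = none := by
            rw [PySem.Dict.get?_eq_none_iff_contains]
            simpa using hc
          rw [PySem.Dict.get?_insert_self, PySem.List.index?_cons_self, hnone]
          simp
      · have hidxc : PySem.List.index? (w :: rest) v =
            (PySem.List.index? rest v).map (· + 1) :=
          PySem.List.index?_cons_of_ne rest (fun h => hw (h.symm))
        have hstep : ∀ d' : PySem.Dict Int Int, PySem.Dict.get? d' v =
              PySem.Dict.get? d v →
            PySem.Dict.get? (firstLoop d' (i + 1) rest) v =
              (PySem.Dict.get? d v).or ((PySem.List.index? (w :: rest) v).map (fun j => i + (j : Int))) := by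
          intro d' hd'
          rw [ih _ _ _ hv, hd', hidxc]
          cases hidx : PySem.List.index? rest v with
          | none => simp
          | some j =>
              have harith : i + 1 + (j : Int) = i + ((j + 1 : Nat) : Int) := by push_cast; ring
              cases hd : PySem.Dict.get? d v <;> simp [harith]
        simp only [firstLoop]
        split
        · exact hstep _ (PySem.Dict.get?_insert_of_ne _ _ hw)
        · exact hstep _ rfl

lemma locs_eq (grid : List Int) :
    (grid.filter (fun v => !(v == 0))).map
      (fun v => (PySem.Dict.get? (firstLoop PySem.Dict.empty 0 grid) v).getD 0) =
    (grid.filter (fun dot => !(dot == 0))).map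
      (fun dot => (((PySem.List.index? grid dot).getD 0 : Nat) : Int)) := by
  apply List.map_congr_left
  intro v hv
  have hmem : v ∈ grid := (List.mem_filter.mp hv).1
  have hsome : (PySem.List.index? grid v).isSome := by
    rw [PySem.List.index?_isSome_iff]; exact hmem
  obtain ⟨k, hk⟩ := Option.isSome_iff_exists.mp hsome
  have hv0 : v ≠ 0 := by
    have := (List.mem_filter.mp hv).2
    simpa using this
  rw [firstLoop_get _ _ _ _ hv0, PySem.Dict.get?_empty, hk]
  simp

lemma chk_eq (path : List Int) : ∀ l : List Int,
    chkPairs path l = (l.zip l.tail).all (fun p =>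
      (PySem.List.pyGetD path p.2 0 == 0) ||
      ((PySem.List.pyGetD path p.1 0 != 0) &&
        decide (PySem.List.pyGetD path p.1 0 ≤ PySem.List.pyGetD path p.2 0))) := by
  intro l
  induction l with
  | nil => rfl
  | cons a t ih =>
      cases t with
      | nil => rfl
      | cons b rest =>
          have ih' := ih
          simp only [List.tail_cons, List.zip_cons_cons, List.all_cons] at ih' ⊢
          rw [← ih']
          by_cases hb : PySem.List.pyGetD path b 0 = 0
          · simp [chkPairs, hb]
          · by_cases hgt : PySem.List.pyGetD path a 0 > PySem.List.pyGetD path b 0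
            · have : ¬ PySem.List.pyGetD path a 0 ≤ PySem.List.pyGetD path b 0 := by omega
              simp [chkPairs, hb, hgt, this]
            · by_cases ha0 : PySem.List.pyGetD path a 0 = 0
              · simp [chkPairs, hb, ha0]
              · have hle : PySem.List.pyGetD path a 0 ≤ PySem.List.pyGetD path b 0 := by omega
                simp [chkPairs, hb, hgt, ha0, hle]

lemma ordered_eq (grid path : List Int) : orderedB grid path = isValid grid path := by
  unfold orderedB isValid locsB
  rw [locs_eq, chk_eq]

lemma ite_append_singleton (P : Prop) [Decidable P] (acc : List Int) (x : Int) :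
    (if P then acc ++ [x] else acc) = acc ++ (if P then [x] else []) := by
  split <;> simp

lemma movesB_eq (grid path : List Int) (hlen : path.length = 36) :
    movesB grid path (pymax path + 1) = cands grid path := by
  have hne : path ≠ [] := by intro h; rw [h] at hlen; simp at hlen
  have he0 : (0 : Int) ≤ endIdx path := by unfold endIdx; exact Int.natCast_nonneg _
  have he36 : endIdx path < 36 := by
    have := endIdx_lt path hne
    rw [hlen] at this
    exact_mod_cast this
  unfold movesB cands
  rw [ordered_eq]
  cases hv : isValid grid path with
  | false => simp
  | true =>
      simp only [Bool.not_true, Bool.false_eq_true, if_false, if_true]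
      have hhead : headB path (pymax path + 1) = endIdx path := by
        unfold headB endIdx
        rw [show pymax path + 1 - 1 = pymax path from by ring]
      rw [hhead]
      show _ = findEmptyCells path
      unfold findEmptyCells endIdx
      set e : Int := (((PySem.List.index? path (pymax path)).getD 0 : Nat) : Int) with hee
      have he0' : (0 : Int) ≤ e := by rw [hee]; exact Int.natCast_nonneg _
      have he36' : e < 36 := by rw [hee]; exact he36
      simp only [List.foldl_cons, List.foldl_nil]
      have hfd : ∀ n : Int, PySem.Int.floordiv n 6 = n / 6 :=
        fun n => PySem.Int.floordiv_eq_ediv_of_pos (by norm_num)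
      have hU : (0 ≤ e - 6 ∧ e - 6 < 36 ∧ (e, e - 6) ∉ wallSet ∧
            PySem.List.pyGet? path (e - 6) = some 0) ↔
          (0 ≤ e - 6 ∧ PySem.List.pyGet? path (e - 6) = some 0 ∧ (e, e - 6) ∉ walls) := by
        rw [not_congr (wall_mem_iff (e, e - 6))]
        constructor
        · rintro ⟨a, _, c, d⟩; exact ⟨a, d, c⟩
        · rintro ⟨a, b, c⟩; exact ⟨a, by omega, c, b⟩
      have hD : (0 ≤ e + 6 ∧ e + 6 < 36 ∧ (e, e + 6) ∉ wallSet ∧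
            PySem.List.pyGet? path (e + 6) = some 0) ↔
          (e + 6 ≤ 35 ∧ PySem.List.pyGet? path (e + 6) = some 0 ∧ (e, e + 6) ∉ walls) := by
        rw [not_congr (wall_mem_iff (e, e + 6))]
        constructor
        · rintro ⟨_, b, c, d⟩; exact ⟨by omega, d, c⟩
        · rintro ⟨a, b, c⟩; exact ⟨by omega, by omega, c, b⟩
      have hL : (0 ≤ e - 1 ∧ e - 1 < 36 ∧
            PySem.Int.floordiv (e - 1) 6 = PySem.Int.floordiv e 6 ∧ (e, e - 1) ∉ wallSet ∧
            PySem.List.pyGet? path (e - 1) = some 0) ↔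
          (0 < PySem.Int.mod e 6 ∧ PySem.List.pyGet? path (e - 1) = some 0 ∧
            (e, e - 1) ∉ walls) := by
        rw [not_congr (wall_mem_iff (e, e - 1)), hfd, hfd,
          PySem.Int.mod_eq_emod_of_pos (by norm_num)]
        constructor
        · rintro ⟨a, b, c, d, f⟩; exact ⟨by omega, f, d⟩
        · rintro ⟨a, b, c⟩; exact ⟨by omega, by omega, by omega, c, b⟩
      have hR : (0 ≤ e + 1 ∧ e + 1 < 36 ∧
            PySem.Int.floordiv (e + 1) 6 = PySem.Int.floordiv e 6 ∧ (e, e + 1) ∉ wallSet ∧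
            PySem.List.pyGet? path (e + 1) = some 0) ↔
          (PySem.Int.mod e 6 < 5 ∧ PySem.List.pyGet? path (e + 1) = some 0 ∧
            (e, e + 1) ∉ walls) := by
        rw [not_congr (wall_mem_iff (e, e + 1)), hfd, hfd,
          PySem.Int.mod_eq_emod_of_pos (by norm_num)]
        constructor
        · rintro ⟨a, b, c, d, f⟩; exact ⟨by omega, f, d⟩
        · rintro ⟨a, b, c⟩; exact ⟨by omega, by omega, by omega, c, b⟩
      rw [if_congr hU rfl rfl, if_congr hD rfl rfl, if_congr hL rfl rfl, if_congr hR rfl rfl]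
      rw [ite_append_singleton, ite_append_singleton, ite_append_singleton, ite_append_singleton]
      simp only [List.nil_append, List.append_assoc]

-- ============ B's loop ============

-- invariant of a suspended frame
def FrameOK (fr : List Int × Int × List Int) : Prop :=
  fr.1.length = 36 ∧ fr.2.1 = pymax fr.1 + 1 ∧ fr.2.1 ≤ 36 ∧ ∀ c ∈ fr.2.2, cellOK fr.1 c

-- loop-iteration cost of exhaustively exploring one node
def Wcost (grid : List Int) : Nat → List Int → List Int → Nat
  | 0, _, _ => 0
  | (_ + 1), _, [] => 1
  | (f + 1), path, c :: r =>
      1 + Wcost grid f (PySem.List.pySetD path c (pymax path + 1))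
            (cands grid (PySem.List.pySetD path c (pymax path + 1)))
        + Wcost grid (f + 1) path r
  termination_by f _ r => (f, r.length)

lemma Wcost_pos (grid : List Int) (f : Nat) (path r : List Int) :
    1 ≤ Wcost grid (f + 1) path r := by
  cases r with
  | nil => simp [Wcost]
  | cons c r => simp [Wcost]; omega

lemma Wcost_fi (grid : List Int) : ∀ n f f' path r, f + f' ≤ n →
    (∀ c ∈ r, cellOK path c) → zeros path < f → zeros path < f' →
    Wcost grid f path r = Wcost grid f' path r := by
  intro n
  induction n with
  | zero => intro f f' path r hle hok hf hf'; omega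
  | succ n ih =>
      intro f f' path r hle hok hf hf'
      obtain ⟨fa, rfl⟩ : ∃ fa, f = fa + 1 := ⟨f - 1, by omega⟩
      obtain ⟨fb, rfl⟩ : ∃ fb, f' = fb + 1 := ⟨f' - 1, by omega⟩
      induction r with
      | nil => simp [Wcost]
      | cons c r ihr =>
          have hcell := hok c (List.mem_cons_self)
          have hnn : pymax path + 1 ≠ 0 := by
            have := pymax_nonneg path c hcell; omega
          have hz := zeros_set path c hcell (pymax path + 1) hnn
          simp only [Wcost]
          rw [ih fa fb _ _ (by omega)
                (fun c' hc' => mem_cands _ _ _ hc') (by omega) (by omega),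
              ihr (fun c' hc' => hok c' (List.mem_cons_of_mem _ hc'))]

lemma Wcost_bound (grid : List Int) : ∀ f path r,
    Wcost grid f path r + 1 ≤ (r.length + 1) * 5 ^ (f + 1) := by
  intro f
  induction f with
  | zero =>
      intro path r
      have h5 : (5 : Nat) ≤ (r.length + 1) * 5 ^ (0 + 1) := by
        have h : 1 * 5 ≤ (r.length + 1) * 5 := by
          apply Nat.mul_le_mul_right; omega
        rw [one_mul] at h
        rw [pow_one]
        exact h
      simp [Wcost]; omega
  | succ f ihf =>
      intro path r
      induction r with
      | nil =>
          have h25 : (5 : Nat) ^ 2 ≤ 5 ^ (f + 2) :=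
            Nat.pow_le_pow_right (by norm_num) (by omega)
          have hw : Wcost grid (f + 1) path [] = 1 := by simp [Wcost]
          have hr : ((([] : List Int)).length + 1) * 5 ^ (f + 1 + 1) = 5 ^ (f + 2) := by simp
          rw [hw, hr]
          omega
      | cons c r ihr =>
          simp only [Wcost, List.length_cons]
          have h1 := ihf (PySem.List.pySetD path c (pymax path + 1))
            (cands grid (PySem.List.pySetD path c (pymax path + 1)))
          have hlc := length_cands grid (PySem.List.pySetD path c (pymax path + 1))
          have hA : ((cands grid (PySem.List.pySetD path c (pymax path + 1))).length + 1) *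
              5 ^ (f + 1) ≤ 5 * 5 ^ (f + 1) := by
            apply Nat.mul_le_mul_right; omega
          have hB : (5 : Nat) * 5 ^ (f + 1) = 5 ^ (f + 2) := by ring
          have h1' : Wcost grid f (PySem.List.pySetD path c (pymax path + 1))
              (cands grid (PySem.List.pySetD path c (pymax path + 1))) + 1 ≤ 5 ^ (f + 2) := by
            omega
          have h2 := ihr
          have hsplit : (r.length + 1 + 1) * 5 ^ (f + 1 + 1) =
              (r.length + 1) * 5 ^ (f + 1 + 1) + 5 ^ (f + 2) := by ring
          omega

-- total suspended cost of the stack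
def SWf (grid : List Int) (frames : List (List Int × Int × List Int)) : Nat :=
  (frames.map (fun fr => Wcost grid 37 fr.1 fr.2.2)).sum

-- what resuming the whole stack computes in A's terms
def resumeF (grid : List Int) (frames : List (List Int × Int × List Int)) : Bool :=
  frames.any (fun fr => anyA grid fr.1 fr.2.2)

-- the bridge: B's loop computes the OR of all suspended nodes' searches
lemma loopB_eq (grid : List Int) : ∀ n frames,
    (∀ fr ∈ frames, FrameOK fr) → SWf grid frames ≤ n →
    loopB grid n frames = resumeF grid frames := by
  intro n
  induction n with
  | zero =>
      intro frames hok hw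
      cases frames with
      | nil => rfl
      | cons fr s =>
          exfalso
          have h1 := Wcost_pos grid 36 fr.1 fr.2.2
          have : SWf grid (fr :: s) = Wcost grid 37 fr.1 fr.2.2 + SWf grid s := by
            simp only [SWf, List.map_cons, List.sum_cons]
          rw [show (37 : Nat) = 36 + 1 from rfl] at this
          omega
  | succ n ih =>
      intro frames hok hw
      cases frames with
      | nil => simp [loopB, resumeF]
      | cons fr s =>
          obtain ⟨cur, nxt, rem⟩ := fr
          obtain ⟨hlen, hnn, hle36, hcells⟩ := hok _ (List.mem_cons_self)
          have hoks : ∀ fr ∈ s, FrameOK fr := fun fr h => hok fr (List.mem_cons_of_mem _ h)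
          have hswcons : SWf grid ((cur, nxt, rem) :: s) =
              Wcost grid 37 cur rem + SWf grid s := by
            simp only [SWf, List.map_cons, List.sum_cons]
          cases rem with
          | nil =>
              have hw1 : Wcost grid 37 cur [] = 1 := by
                rw [show (37 : Nat) = 36 + 1 from rfl]; simp [Wcost]
              simp only [loopB]
              rw [ih s hoks (by rw [hswcons, hw1] at hw; omega)]
              simp [resumeF, anyA]
          | cons c rem' =>
              dsimp only at hnn hle36 hcells hlen
              have hcell : cellOK cur c := hcells c (List.mem_cons_self)
              have hnn0 : 0 ≤ pymax cur := pymax_nonneg cur c hcell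
              subst hnn
              have hmaxc := pymax_set cur c hcell
              have hzc := zeros_set cur c hcell (pymax cur + 1) (by omega)
              have hz36 : zeros cur ≤ 36 := by
                have := zeros_le_len cur; omega
              have hlenc : (PySem.List.pySetD cur c (pymax cur + 1)).length = 36 := by
                rw [length_set']; exact hlen
              simp only [loopB]
              by_cases h36 : pymax cur + 1 = 36
              · rw [if_pos h36]
                have hsf : solveFuel grid 37 (PySem.List.pySetD cur c (pymax cur + 1)) = true := by
                  rw [show (37 : Nat) = 36 + 1 from rfl,
                      solveFuel_node grid _ 36 hlenc (by omega), hmaxc]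
                  rw [if_pos (by omega)]
                simp [resumeF, anyA, hsf]
              · rw [if_neg h36]
                have hmv : movesB grid (PySem.List.pySetD cur c (pymax cur + 1)) (pymax cur + 1 + 1) =
                    cands grid (PySem.List.pySetD cur c (pymax cur + 1)) := by
                  have h := movesB_eq grid (PySem.List.pySetD cur c (pymax cur + 1)) hlenc
                  rw [hmaxc] at h
                  exact h
                have hwc : Wcost grid 37 cur (c :: rem') =
                    1 + Wcost grid 36 (PySem.List.pySetD cur c (pymax cur + 1))
                          (cands grid (PySem.List.pySetD cur c (pymax cur + 1)))
                      + Wcost grid 37 cur rem' := by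
                  rw [show (37 : Nat) = 36 + 1 from rfl]
                  simp only [Wcost]
                have hwfi : Wcost grid 36 (PySem.List.pySetD cur c (pymax cur + 1))
                      (cands grid (PySem.List.pySetD cur c (pymax cur + 1))) =
                    Wcost grid 37 (PySem.List.pySetD cur c (pymax cur + 1))
                      (cands grid (PySem.List.pySetD cur c (pymax cur + 1))) :=
                  Wcost_fi grid 73 36 37 _ _ (by omega)
                    (fun c' hc' => mem_cands _ _ _ hc') (by omega) (by omega)
                have hih := ih ((PySem.List.pySetD cur c (pymax cur + 1), pymax cur + 1 + 1,
                      movesB grid (PySem.List.pySetD cur c (pymax cur + 1)) (pymax cur + 1 + 1)) ::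
                      (cur, pymax cur + 1, rem') :: s)
                    (by
                      intro fr hfr
                      rcases List.mem_cons.mp hfr with rfl | hfr2
                      · unfold FrameOK
                        dsimp only
                        refine ⟨hlenc, by rw [hmaxc], by omega, ?_⟩
                        intro c' hc'
                        rw [hmv] at hc'
                        exact mem_cands _ _ _ hc'
                      rcases List.mem_cons.mp hfr2 with rfl | hfr3
                      · unfold FrameOK
                        dsimp only
                        exact ⟨hlen, rfl, by omega,
                          fun c' hc' => hcells c' (List.mem_cons_of_mem _ hc')⟩
                      · exact hoks _ hfr3)
                    (by
                      simp only [SWf, List.map_cons, List.sum_cons]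
                      rw [hmv, ← hwfi]
                      rw [hswcons, hwc] at hw
                      simp only [SWf] at hw
                      omega)
                rw [hih]
                have hsf : solveFuel grid 37 (PySem.List.pySetD cur c (pymax cur + 1)) =
                    anyA grid (PySem.List.pySetD cur c (pymax cur + 1))
                      (cands grid (PySem.List.pySetD cur c (pymax cur + 1))) := by
                  rw [show (37 : Nat) = 36 + 1 from rfl,
                      solveFuel_node grid _ 36 hlenc (by omega), hmaxc]
                  rw [if_neg (by omega)]
                have hcons : anyA grid cur (c :: rem') =
                    (anyA grid (PySem.List.pySetD cur c (pymax cur + 1))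
                      (cands grid (PySem.List.pySetD cur c (pymax cur + 1))) ||
                      anyA grid cur rem') := by
                  show (solveFuel grid 37 (PySem.List.pySetD cur c (pymax cur + 1)) ||
                      anyA grid cur rem') = _
                  rw [hsf]
                simp only [resumeF, List.any_cons]
                rw [hmv, hcons, Bool.or_assoc]

-- ===== VERDICT (by name: the statement is the Claim_ definition above) =====
theorem solve_spec : Claim_equal_solve := by
  unfold Claim_equal_solve
  intro grid path _ hpre
  have halt : solve_alt grid path =
      if pymax path + 1 > 36 then true
      else loopB grid (5 ^ 39) [(path, pymax path + 1, movesB grid path (pymax path + 1))] := rfl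
  rcases hpre with ⟨x, hx, h35⟩ | ⟨hplen, _⟩
  · have hgt : pymax path + 1 > 36 := by
      have := pymax_le path x hx; omega
    unfold Spec_solve solve
    rw [halt, if_pos hgt]
    rw [show (37 : Nat) = 36 + 1 from rfl]
    simp only [solveFuel]
    rw [if_pos hgt]
  unfold Spec_solve solve
  have hz36 : zeros path ≤ 36 := by
    have := zeros_le_len path; omega
  rw [show (37 : Nat) = 36 + 1 from rfl, solveFuel_node grid path 36 hplen (by omega), halt]
  by_cases hgt : pymax path + 1 > 36
  · rw [if_pos hgt, if_pos hgt]
  · rw [if_neg hgt, if_neg hgt]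
    rw [movesB_eq grid path hplen]
    have hwb : Wcost grid 37 path (cands grid path) + 1 ≤
        ((cands grid path).length + 1) * 5 ^ 38 := by
      have h := Wcost_bound grid 37 path (cands grid path)
      norm_num at h
      exact h
    have hlc := length_cands grid path
    rw [loopB_eq grid (5 ^ 39) [(path, pymax path + 1, cands grid path)]
          (by
            intro fr hfr
            rcases List.mem_cons.mp hfr with rfl | h
            · unfold FrameOK
              dsimp only
              exact ⟨hplen, rfl, by omega, fun c hc => mem_cands _ _ _ hc⟩
            · simp at h)
          (by
            show Wcost grid 37 path (cands grid path) + 0 ≤ 5 ^ 39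
            omega)]
    simp [resumeF]
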